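-- pv_equiv track=rewrite | github.com/schxo99/coding-test | 프로그래머스/레벨 0/숨어있는 숫자의 덧셈.py | solution
-- ===== SOURCE A (Python) =====
-- def solution(my_string):
--     my_string+='A'
--     result = 0
--     hap = ''
--     my_string = list(my_string)
--     for i in my_string:
--         if i.isdigit():
--             hap += str(i)
--         elif len(hap) >= 1:
--             result += int(hap)
--             hap = ''
--     return result
-- ===== SOURCE B (Python) =====
-- def solution(my_string):
--     runs = []
--     i = 0
--     n = len(my_string)
--     while i < n:
--         k = my_string[i].isdigit()
--         j = i + 1
--         while j < n and my_string[j].isdigit() == k: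
--             j += 1
--         runs.append((k, my_string[i:j]))
--         i = j
--     return sum(int(g) for k, g in runs if k)
-- ===== Notes on version B (the rewrite author's own statement) =====
-- stated objective: alternative
-- what changed: B first segments the string into maximal same-class (digit/non-digit) runs and then sums int() of the digit runs, instead of A's running accumulator string flushed at class boundaries with an appended sentinel character.
import Mathlib
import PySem

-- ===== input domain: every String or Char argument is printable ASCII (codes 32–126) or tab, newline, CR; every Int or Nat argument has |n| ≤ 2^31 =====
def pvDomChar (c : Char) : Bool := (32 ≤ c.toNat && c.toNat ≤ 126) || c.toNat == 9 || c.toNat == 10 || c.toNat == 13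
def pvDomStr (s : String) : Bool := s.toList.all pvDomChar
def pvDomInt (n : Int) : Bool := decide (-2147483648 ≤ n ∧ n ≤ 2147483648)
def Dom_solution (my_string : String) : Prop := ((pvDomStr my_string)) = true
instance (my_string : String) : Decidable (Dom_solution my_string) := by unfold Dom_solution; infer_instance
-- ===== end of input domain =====

-- B changes the decomposition: segment into maximal digit/non-digit runs, then sum the digit runs
-- (A keeps a running accumulator string flushed at boundaries, with a sentinel appended).

-- ===== PORT A =====
-- int(hap) at a flush: hap is a nonempty all-digit string, so int() always returns; getD 0 is unreachable.
def solLoopA : List Char → Int → List Char → Int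
  | [], result, _ => result
  | i :: rest, result, hap =>
    if PySem.Chars.isdigit i then
      solLoopA rest result (hap ++ [i])
    else if 1 ≤ hap.length then
      solLoopA rest (result + (PySem.Int.ofChars? hap).getD 0) []
    else
      solLoopA rest result hap

def solution (my_string : String) : Int :=
  solLoopA (my_string ++ "A").toList 0 []

-- ===== PORT B =====
-- the inner while loop: extend the run while the digit-class stays equal (takeWhile/dropWhile split)
def solRuns (l : List Char) : List (Bool × List Char) :=
  match l with
  | [] => []
  | c :: cs =>
    let k := PySem.Chars.isdigit c
    (k, c :: cs.takeWhile (fun d => PySem.Chars.isdigit d == k))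
      :: solRuns (cs.dropWhile (fun d => PySem.Chars.isdigit d == k))
termination_by l.length
decreasing_by
  simpa using Nat.lt_succ_of_le (List.length_dropWhile_le _ _)

def solution_alt (my_string : String) : Int :=
  ((solRuns my_string.toList).filter (·.1)).foldl
    (fun acc p => acc + (PySem.Int.ofChars? p.2).getD 0) 0

-- ===== PRECONDITION & SPEC =====
def Spec_solution (my_string : String) (out : Int) : Prop := out = solution_alt my_string
instance (my_string : String) (out : Int) : Decidable (Spec_solution my_string out) := by unfold Spec_solution; infer_instance

-- ===== CLAIM (what is proved, stated in full; the proofs are below) =====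
def Claim_equal_solution : Prop := ∀ (my_string : String), Dom_solution my_string → Spec_solution my_string (solution my_string)

-- ===== LEMMAS AND PROOFS =====

def intv (cs : List Char) : Int := (PySem.Int.ofChars? cs).getD 0

-- A's loop with the result accumulator abstracted away
def tailVal : List Char → List Char → Int
  | hap, [] => if hap = [] then 0 else intv hap
  | hap, c :: cs =>
    if PySem.Chars.isdigit c then tailVal (hap ++ [c]) cs
    else (if hap = [] then 0 else intv hap) + tailVal [] cs

def sumB (rs : List (Bool × List Char)) : Int :=
  (rs.filter (·.1)).foldl (fun acc p => acc + intv p.2) 0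

lemma foldl_add_shift (f : Bool × List Char → Int) :
    ∀ (l : List (Bool × List Char)) (a : Int),
      List.foldl (fun acc p => acc + f p) a l = a + List.foldl (fun acc p => acc + f p) 0 l := by
  intro l
  induction l with
  | nil => simp
  | cons x xs ih =>
    intro a
    rw [List.foldl_cons, List.foldl_cons, ih (a + f x), ih (0 + f x)]
    ring

lemma sumB_cons (k : Bool) (g : List Char) (rs : List (Bool × List Char)) :
    sumB ((k, g) :: rs) = (if k then intv g else 0) + sumB rs := by
  cases k
  · simp [sumB]
  · unfold sumB
    rw [List.filter_cons_of_pos (by rfl), List.foldl_cons,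
      foldl_add_shift (fun p => intv p.2)]
    simp

lemma loopA_tailVal : ∀ (l hap : List Char) (res : Int),
    solLoopA (l ++ ['A']) res hap = res + tailVal hap l := by
  intro l
  induction l with
  | nil =>
    intro hap res
    by_cases h : hap = [] <;>
      simp [solLoopA, tailVal, h, intv, PySem.Chars.isdigit]
  | cons c cs ih =>
    intro hap res
    by_cases hd : PySem.Chars.isdigit c
    · simp [solLoopA, hd, tailVal, ih]
    · by_cases h : hap = [] <;>
        simp [solLoopA, hd, tailVal, h, ih, intv, add_assoc]

lemma tailVal_digits : ∀ (cs hap : List Char), hap ≠ [] →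
    tailVal hap cs = intv (hap ++ cs.takeWhile PySem.Chars.isdigit)
      + tailVal [] (cs.dropWhile PySem.Chars.isdigit) := by
  intro cs
  induction cs with
  | nil => intro hap h; simp [tailVal, h]
  | cons c cs ih =>
    intro hap h
    by_cases hd : PySem.Chars.isdigit c
    · simp only [tailVal, hd, if_pos, List.takeWhile_cons, List.dropWhile_cons]
      rw [ih (hap ++ [c]) (by simp)]
      simp
    · simp [tailVal, hd, h]

lemma tailVal_skip : ∀ (cs : List Char),
    tailVal [] (cs.dropWhile (fun d => !PySem.Chars.isdigit d)) = tailVal [] cs := by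
  intro cs
  induction cs with
  | nil => rfl
  | cons c cs ih =>
    by_cases hd : PySem.Chars.isdigit c
    · simp [hd]
    · simp [hd, tailVal, ih]

lemma tailVal_runs : ∀ (n : ℕ) (l : List Char), l.length ≤ n →
    tailVal [] l = sumB (solRuns l) := by
  intro n
  induction n with
  | zero =>
    intro l hl
    rw [List.length_eq_zero_iff.mp (Nat.le_zero.mp hl)]
    simp [tailVal, solRuns, sumB]
  | succ n ih =>
    intro l hl
    match l with
    | [] => simp [tailVal, solRuns, sumB]
    | c :: cs =>
      rw [solRuns]
      have hle : ∀ p : Char → Bool, (cs.dropWhile p).length ≤ n :=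
        fun p => le_trans (List.length_dropWhile_le _ _) (Nat.le_of_succ_le_succ hl)
      by_cases hd : PySem.Chars.isdigit c
      · have hrw : (fun d => PySem.Chars.isdigit d == true) = PySem.Chars.isdigit := by
          funext d; simp
        simp only [hd, sumB_cons, if_pos]
        rw [show tailVal [] (c :: cs) = tailVal [c] cs by simp [tailVal, hd], hrw,
          tailVal_digits cs [c] (by simp), ih _ (hle _)]
        simp
      · have hrw : (fun d => PySem.Chars.isdigit d == false) = (fun d => !PySem.Chars.isdigit d) := by
          funext d; simp
        simp only [Bool.not_eq_true] at hd
        simp only [hd, sumB_cons, Bool.false_eq_true, if_false, zero_add]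
        rw [show tailVal [] (c :: cs) = tailVal [] cs by simp [tailVal, hd], ← tailVal_skip cs,
          ih _ (hle _), hrw]

-- ===== VERDICT (by name: the statement is the Claim_ definition above) =====
theorem solution_spec : Claim_equal_solution := by
  intro s _
  show solution s = solution_alt s
  have h1 : (s ++ "A").toList = s.toList ++ ['A'] := by
    simp
  rw [solution, h1, loopA_tailVal, tailVal_runs s.toList.length s.toList le_rfl]
  simp [solution_alt, sumB, intv]
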